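-- pv_equiv track=rewrite | github.com/Kapiura/JSP2022 | kolokwium/z5.py | trzeciakropka
-- ===== SOURCE A (Python) =====
-- samogloski = ['a','ą','e','ę','i','o','ó','u','y']
--
-- def trzeciakropka(tekstUser):
--     s = 0
--     suma = 0
--     tekstUser = str(tekstUser)
--     tekstUser = tekstUser.lower()
--     tekstUser = list(tekstUser.split(' '))
--     for wyraz in tekstUser:
--         for literka in wyraz:
--             for j in samogloski:
--                 if literka == j:
--                     s+=1
--         if s % 2 == 0:
--             suma+=2
--             s= 0
--         else:
--             suma+=1
--             s=0
--     return suma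
-- ===== SOURCE B (Python) =====
-- samogloski = ['a','ą','e','ę','i','o','ó','u','y']
--
-- def trzeciakropka(tekstUser):
--     suma = 0
--     parity = 0
--     for znak in str(tekstUser).lower() + ' ':
--         if znak == ' ':
--             suma += 2 - parity
--             parity = 0
--         elif znak in samogloski:
--             parity = 1 - parity
--     return suma
-- ===== Notes on version B (the rewrite author's own statement) =====
-- stated objective: simpler
-- what changed: A splits into words and runs a triple nested loop (words x chars x 9-element vowel list) accumulating 2-or-1 per word; B never builds a word list: it makes one streaming pass over the lowered string with a sentinel space, toggling a single parity bit at each vowel and finalising a word at each space.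
import Mathlib
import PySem

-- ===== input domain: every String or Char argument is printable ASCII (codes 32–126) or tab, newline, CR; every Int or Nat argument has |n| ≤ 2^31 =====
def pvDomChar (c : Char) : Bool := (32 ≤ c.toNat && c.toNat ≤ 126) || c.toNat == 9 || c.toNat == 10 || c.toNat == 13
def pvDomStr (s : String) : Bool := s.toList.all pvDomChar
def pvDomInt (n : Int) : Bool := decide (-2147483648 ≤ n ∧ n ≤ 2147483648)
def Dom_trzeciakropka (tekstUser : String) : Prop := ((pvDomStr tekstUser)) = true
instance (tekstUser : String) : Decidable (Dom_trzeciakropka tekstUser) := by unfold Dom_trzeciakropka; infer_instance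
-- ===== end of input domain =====

-- B replaces A's split-into-words + triple nested per-word loops by a single streaming scan of the
-- lowered string (with a sentinel space appended): a parity bit is toggled at each vowel and the word
-- is finalised at each space.  Objective: simpler (no word list, one pass, one state bit).

-- ===== PORT A =====
-- samogloski = ['a','ą','e','ę','i','o','ó','u','y']
def samogloski : List Char := ['a','ą','e','ę','i','o','ó','u','y']

def trzeciakropka (tekstUser : String) : Int :=
  -- s = 0; suma = 0; tekstUser = str(tekstUser).lower().split(' ')
  let words := (PySem.Str.split? (PySem.Str.lower tekstUser) " ").getD []
  (words.foldl (fun (st : Int × Int) wyraz =>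
      -- for literka in wyraz: for j in samogloski: if literka == j: s += 1
      let s := wyraz.toList.foldl (fun s literka =>
        samogloski.foldl (fun s j => if literka == j then s + 1 else s) s) st.1
      -- if s % 2 == 0: suma += 2; s = 0  else: suma += 1; s = 0
      if s % 2 == 0 then ((0 : Int), st.2 + 2) else ((0 : Int), st.2 + 1))
    ((0 : Int), (0 : Int))).2

-- ===== PORT B =====
-- for znak in str(tekstUser).lower() + ' ':  (single pass, state = (parity, suma))
def trzeciakropka_alt (tekstUser : String) : Int :=
  (((PySem.Str.lower tekstUser).toList ++ [' ']).foldl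
    (fun (st : Int × Int) znak =>
      if znak == ' ' then ((0 : Int), st.2 + (2 - st.1))
      else if samogloski.contains znak then (1 - st.1, st.2)
      else st)
    ((0 : Int), (0 : Int))).2

-- ===== PRECONDITION & SPEC =====
def Spec_trzeciakropka (tekstUser : String) (out : Int) : Prop := out = trzeciakropka_alt tekstUser
instance (tekstUser : String) (out : Int) : Decidable (Spec_trzeciakropka tekstUser out) := by unfold Spec_trzeciakropka; infer_instance

-- ===== CLAIM (what is proved, stated in full; the proofs are below) =====
def Claim_equal_trzeciakropka : Prop := ∀ (tekstUser : String), Dom_trzeciakropka tekstUser → Spec_trzeciakropka tekstUser (trzeciakropka tekstUser)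

-- ===== LEMMAS AND PROOFS =====

-- simple structural characterisation of splitting on a single space
def splitSp : List Char → List (List Char)
  | [] => [[]]
  | c :: cs => if c = ' ' then [] :: splitSp cs else (splitSp cs).modifyHead (c :: ·)

theorem splitSp_ne_nil (cs : List Char) : splitSp cs ≠ [] := by
  induction cs with
  | nil => simp [splitSp]
  | cons c cs ih =>
    simp only [splitSp]
    split
    · simp
    · cases h : splitSp cs with
      | nil => exact absurd h ih
      | cons w ws => simp [List.modifyHead]

theorem splitOn_go_spec (fuel : Nat) (l cur : List Char) (acc : List (List Char))
    (h : l.length < fuel) :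
    PySem.Chars.splitOn.go [' '] fuel l cur acc
      = acc.reverse ++ (splitSp l).modifyHead (cur.reverse ++ ·) := by
  induction fuel generalizing l cur acc with
  | zero => omega
  | succ fuel ih =>
    cases l with
    | nil =>
      simp [PySem.Chars.splitOn.go, splitSp, List.modifyHead]
    | cons c rest =>
      simp only [PySem.Chars.splitOn.go]
      by_cases hc : c = ' '
      · have hp : List.isPrefixOf [' '] (c :: rest) = true := by
          simp [List.isPrefixOf, hc]
        rw [if_pos hp]
        have : List.drop (List.length [' ']) (c :: rest) = rest := by simp
        rw [this, ih rest [] (cur.reverse :: acc) (by simp at h ⊢; omega)]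
        simp only [splitSp, if_pos hc, List.modifyHead, List.reverse_cons, List.append_assoc]
        cases splitSp rest <;> simp
      · have hp : List.isPrefixOf [' '] (c :: rest) = false := by
          simp [List.isPrefixOf]
          exact fun hcontra => absurd hcontra.symm hc
        rw [if_neg (by simp [hp])]
        rw [ih rest (c :: cur) acc (by simp at h ⊢; omega)]
        have hne := splitSp_ne_nil rest
        cases hs : splitSp rest with
        | nil => exact absurd hs hne
        | cons w ws =>
          simp [splitSp, hc, hs, List.modifyHead]

theorem splitOn_space (cs : List Char) :
    PySem.Chars.splitOn cs [' '] = splitSp cs := by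
  unfold PySem.Chars.splitOn
  rw [splitOn_go_spec (cs.length + 1) cs [] [] (by omega)]
  have hne := splitSp_ne_nil cs
  cases hs : splitSp cs with
  | nil => exact absurd hs hne
  | cons w ws => simp [List.modifyHead]

-- A's innermost loop over the vowel list adds an indicator of membership.
theorem foldl_vowels (c : Char) (s : Int) :
    samogloski.foldl (fun s j => if c == j then s + 1 else s) s
      = s + (if samogloski.contains c then 1 else 0) := by
  simp only [samogloski, List.foldl, List.contains_cons, List.contains_nil]
  by_cases h1 : c == 'a' <;> by_cases h2 : c == 'ą' <;> by_cases h3 : c == 'e' <;>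
    by_cases h4 : c == 'ę' <;> by_cases h5 : c == 'i' <;> by_cases h6 : c == 'o' <;>
    by_cases h7 : c == 'ó' <;> by_cases h8 : c == 'u' <;> by_cases h9 : c == 'y' <;>
    simp_all [beq_iff_eq]

-- A's middle loop over the characters of a word counts its vowels (offset by the incoming s).
theorem foldl_word (cs : List Char) (s : Int) :
    cs.foldl (fun s literka =>
        samogloski.foldl (fun s j => if literka == j then s + 1 else s) s) s
      = s + (cs.countP (fun ch => samogloski.contains ch) : Int) := by
  induction cs generalizing s with
  | nil => simp
  | cons c cs ih =>
    simp only [List.foldl_cons]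
    rw [foldl_vowels, ih, List.countP_cons]
    by_cases h : samogloski.contains c
    · rw [if_pos h, if_pos h]; push_cast; ring
    · rw [if_neg h, if_neg h]; push_cast; ring

-- per-token contribution of B's scan, with the first token's parity offset by p
def gContrib : List (List Char) → Int → Int
  | [], _ => 0
  | w :: ws, p => (2 - (p + (w.countP (fun ch => samogloski.contains ch) : Int)) % 2) + gContrib ws 0

-- B's scan over cs ++ [' '] from state (p, suma) computes suma + gContrib (splitSp cs) p.
theorem scan_spec (cs : List Char) (p suma : Int) (hp : p = 0 ∨ p = 1) :
    ((cs ++ [' ']).foldl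
      (fun (st : Int × Int) znak =>
        if znak == ' ' then ((0 : Int), st.2 + (2 - st.1))
        else if samogloski.contains znak then (1 - st.1, st.2)
        else st)
      (p, suma)).2 = suma + gContrib (splitSp cs) p := by
  induction cs generalizing p suma with
  | nil =>
    simp [splitSp, gContrib]
    rcases hp with h | h <;> simp [h]
  | cons c cs ih =>
    simp only [List.cons_append, List.foldl_cons]
    by_cases hc : c = ' '
    · rw [if_pos (by simp [hc])]
      rw [ih 0 (suma + (2 - p)) (Or.inl rfl)]
      simp only [splitSp, if_pos hc, gContrib]
      rcases hp with h | h <;> simp [h] <;> ring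
    · rw [if_neg (by simp [hc])]
      by_cases hv : samogloski.contains c
      · rw [if_pos (by simpa using hv)]
        rw [ih (1 - p) suma (by rcases hp with h | h <;> simp [h])]
        have hne := splitSp_ne_nil cs
        cases hs : splitSp cs with
        | nil => exact absurd hs hne
        | cons w ws =>
          simp only [splitSp, if_neg hc, hs, List.modifyHead, gContrib, List.countP_cons]
          rw [if_pos (by simpa using hv)]
          have key : (1 - p + (w.countP (fun ch => samogloski.contains ch) : Int)) % 2
              = (p + ((w.countP (fun ch => samogloski.contains ch) : Int) + 1)) % 2 := by
            rcases hp with h | h <;> subst h <;> omega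
          rw [key]
          push_cast; ring_nf
      · rw [if_neg (by simpa using hv)]
        rw [ih p suma hp]
        have hne := splitSp_ne_nil cs
        cases hs : splitSp cs with
        | nil => exact absurd hs hne
        | cons w ws =>
          simp only [splitSp, if_neg hc, hs, List.modifyHead, gContrib, List.countP_cons]
          rw [if_neg (by simpa using hv)]
          simp

-- A's outer loop over the token list equals the sum of B's per-token contributions (from parity 0).
theorem foldl_words_eq_g (L : List (List Char)) (acc : Int) :
    ((L.map String.ofList).foldl (fun (st : Int × Int) wyraz =>
        let s := wyraz.toList.foldl (fun s literka =>
          samogloski.foldl (fun s j => if literka == j then s + 1 else s) s) st.1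
        if s % 2 == 0 then ((0 : Int), st.2 + 2) else ((0 : Int), st.2 + 1))
      ((0 : Int), acc)).2 = acc + gContrib L 0 := by
  induction L generalizing acc with
  | nil => simp [gContrib]
  | cons w ws ih =>
    simp only [List.map_cons, List.foldl_cons]
    rw [foldl_word]
    simp only [String.toList_ofList]
    set k : Int := (w.countP (fun ch => samogloski.contains ch) : Int) with hk
    have hk0 : 0 ≤ k := by positivity
    by_cases hb : (((0 : Int) + k) % 2 == 0) = true
    · rw [if_pos hb, ih, gContrib]
      rw [beq_iff_eq] at hb
      have : (0 + k) % 2 = 0 := hb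
      have h2 : k % 2 = 0 := by omega
      rw [← hk]; omega
    · rw [if_neg hb, ih, gContrib]
      rw [beq_iff_eq] at hb
      have h2 : k % 2 = 1 := by omega
      rw [← hk]; omega

-- ===== VERDICT (by name: the statement is the Claim_ definition above) =====
theorem trzeciakropka_spec : Claim_equal_trzeciakropka := by
  intro t _
  unfold Spec_trzeciakropka trzeciakropka trzeciakropka_alt
  have hsplit : PySem.Str.split? (PySem.Str.lower t) " "
      = some ((splitSp (PySem.Str.lower t).toList).map String.ofList) := by
    simp only [PySem.Str.split?, PySem.Chars.split?]
    have h1 : (" " : String).toList = [' '] := rfl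
    rw [h1]
    simp only [List.isEmpty_cons]
    rw [splitOn_space]
    simp
  rw [hsplit]
  simp only [Option.getD_some]
  rw [foldl_words_eq_g, scan_spec _ 0 0 (Or.inl rfl)]
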